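-- pv_equiv track=rewrite | github.com/miczho/competitive-coding | codeforces-1512-b.py | almostRect
-- ===== SOURCE A (Python) =====
-- def almostRect(n, arr):
--     ans = []
--     for i in range(n):
--         for j in range(n):
--             if arr[i][j] == '*': ans.append([i, j])
--             if len(ans) == 2: break
--
--     if ans[0][0] == ans[1][0]:
--         if ans[0][0] == 0:
--             ans[0][0] += 1
--         else:
--             ans[0][0] -= 1
--         arr[ans[0][0]][ans[0][1]] = '*'
--         arr[ans[0][0]][ans[1][1]] = '*'
--     elif ans[0][1] == ans[1][1]:
--         if ans[0][1] == 0: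
--             ans[0][1] += 1
--         else:
--             ans[0][1] -= 1
--         arr[ans[0][0]][ans[0][1]] = '*'
--         arr[ans[1][0]][ans[0][1]] = '*'
--     else:
--         arr[ans[0][0]][ans[1][1]] = '*'
--         arr[ans[1][0]][ans[0][1]] = '*'
--
--     return '\n'.join([''.join(a) for a in arr])
-- ===== SOURCE B (Python) =====
-- # B: no mutation and no per-branch corner writes — it computes the row-set and column-set
-- # of the target rectangle, then renders every cell in one pass, marking cells lying in
-- # rows x cols; A mutates arr in place, B does not (return-value equivalence only).
-- def almostRect(n, arr):
--     (r1, c1), (r2, c2) = [(i, j) for i in range(n) for j in range(n)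
--                           if arr[i][j] == '*'][:2]
--     rows = {r1, r2} if r1 != r2 else {r2, 1 if r1 == 0 else r1 - 1}
--     cols = {c1, c2} if c1 != c2 else {c2, 1 if c1 == 0 else c1 - 1}
--     return '\n'.join(
--         ''.join('*' if i in rows and j in cols else ch
--                 for j, ch in enumerate(row))
--         for i, row in enumerate(arr))
-- ===== Notes on version B (the rewrite author's own statement) =====
-- stated objective: alternative
-- what changed: A's three bespoke in-place corner-write branches become a declarative rectangle: B computes the target row-set and column-set once and renders every cell of the grid in a single functional pass, marking exactly the cells lying in rows x cols (A mutates arr in place, B never mutates).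
import Mathlib
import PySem

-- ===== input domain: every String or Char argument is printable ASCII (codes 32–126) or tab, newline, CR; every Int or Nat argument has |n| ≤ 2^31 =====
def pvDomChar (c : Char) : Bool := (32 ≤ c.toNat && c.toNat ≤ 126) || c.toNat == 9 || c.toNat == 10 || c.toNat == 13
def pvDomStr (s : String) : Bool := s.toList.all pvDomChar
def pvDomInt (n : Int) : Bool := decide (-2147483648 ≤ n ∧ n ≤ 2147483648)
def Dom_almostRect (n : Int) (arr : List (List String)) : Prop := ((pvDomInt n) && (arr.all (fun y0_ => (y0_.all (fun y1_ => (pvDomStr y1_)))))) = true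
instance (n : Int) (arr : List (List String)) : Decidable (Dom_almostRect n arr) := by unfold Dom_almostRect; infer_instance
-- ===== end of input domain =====

-- B computes the rectangle's row-set and column-set once and renders the whole grid in one
-- functional pass, marking the cells lying in rows x cols; A instead mutates arr in place with
-- per-branch corner writes — the equivalence proved here is about the return value only.

-- ===== PORT A =====
-- arr[i][j] (read; Pre_ keeps every executed access in range)
def aCell (arr : List (List String)) (i j : Int) : String :=
  (PySem.List.pyGet? ((PySem.List.pyGet? arr i).getD []) j).getD ""

-- arr[i][j] = '*'
def aSet (arr : List (List String)) (i j : Int) : List (List String) :=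
  PySem.List.pySetD arr i (PySem.List.pySetD ((PySem.List.pyGet? arr i).getD []) j "*")

-- '\n'.join([''.join(a) for a in arr])
def aRender (arr : List (List String)) : String :=
  PySem.Str.join "\n" (arr.map (fun row => PySem.Str.join "" row))

-- inner 'for j in range(n)' with its 'if len(ans) == 2: break'
def aRow (arr : List (List String)) (i : Int) (js : List Int) (ans : List (Int × Int)) :
    List (Int × Int) :=
  match js with
  | [] => ans
  | j :: rest =>
      let ans' := if aCell arr i j == "*" then ans ++ [(i, j)] else ans
      if ans'.length == 2 then ans' else aRow arr i rest ans'

def almostRect (n : Int) (arr : List (List String)) : String :=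
  let ans := (PySem.List.pyRange 0 n 1).foldl
    (fun ans i => aRow arr i (PySem.List.pyRange 0 n 1) ans) []
  match ans with
  | p0 :: p1 :: _ =>
      if p0.1 == p1.1 then
        let r := if p0.1 == 0 then p0.1 + 1 else p0.1 - 1
        aRender (aSet (aSet arr r p0.2) r p1.2)
      else if p0.2 == p1.2 then
        let c := if p0.2 == 0 then p0.2 + 1 else p0.2 - 1
        aRender (aSet (aSet arr p0.1 c) p1.1 c)
      else
        aRender (aSet (aSet arr p0.1 p1.2) p1.1 p0.2)
  | _ => ""  -- ans[1]: IndexError, excluded by Pre_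

-- ===== PORT B =====
-- arr[i][j] (read; Pre_ keeps every executed access in range)
def bCell (arr : List (List String)) (i j : Int) : String :=
  PySem.List.pyGetD (PySem.List.pyGetD arr i []) j ""

-- the star comprehension, in row-major order
def bStars (n : Int) (arr : List (List String)) : List (Int × Int) :=
  ((PySem.List.pyRange 0 n 1).flatMap
      (fun i => (PySem.List.pyRange 0 n 1).map (fun j => (i, j)))).filter
    (fun p => bCell arr p.1 p.2 == "*")

def almostRect_alt (n : Int) (arr : List (List String)) : String :=
  let s := (bStars n arr).take 2   -- [...][:2]
  match s[0]?, s[1]? with          -- the two-pair unpacking (ValueError if < 2 stars, excluded by Pre_)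
  | some (r1, c1), some (r2, c2) =>
      let rows : PySem.Set Int :=
        if r1 != r2 then PySem.Set.ofList [r1, r2]
        else PySem.Set.ofList [r2, if r1 == 0 then 1 else r1 - 1]
      let cols : PySem.Set Int :=
        if c1 != c2 then PySem.Set.ofList [c1, c2]
        else PySem.Set.ofList [c2, if c1 == 0 then 1 else c1 - 1]
      PySem.Str.join "\n" ((PySem.List.enumerate arr 0).map (fun p =>
        PySem.Str.join "" ((PySem.List.enumerate p.2 0).map (fun q =>
          if PySem.Set.contains rows p.1 && PySem.Set.contains cols q.1 then "*" else q.2))))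
  | _, _ => ""

-- ===== PRECONDITION & SPEC =====
-- Pre_ restricts to grids whose first n rows all have length ≥ n (a well-formed n×n board with
-- at least two stars): on ragged boards whether A's scan raises IndexError or returns depends on
-- where its early break lands (and B's full scan always raises there), which no closed-form
-- shape condition separates.
def Pre_almostRect (n : Int) (arr : List (List String)) : Prop :=
  2 ≤ n ∧ n.toNat ≤ arr.length ∧
  (∀ row ∈ arr.take n.toNat, n.toNat ≤ row.length) ∧
  2 ≤ ((arr.take n.toNat).map (fun row => (row.take n.toNat).count "*")).sum
instance (n : Int) (arr : List (List String)) : Decidable (Pre_almostRect n arr) := by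
  unfold Pre_almostRect; infer_instance

def pvWitness_almostRect : Int × List (List String) :=
  (2, [["*", "."], [".", "*"]])

def Spec_almostRect (n : Int) (arr : List (List String)) (out : String) : Prop := out = almostRect_alt n arr
instance (n : Int) (arr : List (List String)) (out : String) : Decidable (Spec_almostRect n arr out) := by unfold Spec_almostRect; infer_instance

-- ===== CLAIM (what is proved, stated in full; the proofs are below) =====
def Claim_equal_almostRect : Prop := ∀ (n : Int) (arr : List (List String)), Dom_almostRect n arr → Pre_almostRect n arr → Spec_almostRect n arr (almostRect n arr)

-- ===== LEMMAS AND PROOFS =====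

theorem take2_append_congr {α : Type} (X Y L : List α) (h1 : X.take 2 = Y.take 2)
    (h2 : min 2 X.length = min 2 Y.length) :
    (X ++ L).take 2 = (Y ++ L).take 2 ∧ min 2 (X ++ L).length = min 2 (Y ++ L).length := by
  constructor
  · rw [List.take_append, List.take_append, h1]
    have : 2 - X.length = 2 - Y.length := by omega
    rw [this]
  · simp only [List.length_append]; omega

theorem take2_break {α : Type} (X L : List α) (h : X.length = 2) :
    (X ++ L).take 2 = X.take 2 ∧ min 2 (X ++ L).length = min 2 X.length := by
  refine ⟨?_, ?_⟩
  · rw [List.take_append, h]; simp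
  · simp only [List.length_append]; omega

-- the inner row loop appends exactly the row's stars, up to the break at length 2
theorem aRow_spec (arr : List (List String)) (i : Int) (js : List Int) (ans : List (Int × Int)) :
    (aRow arr i js ans).take 2
        = (ans ++ (js.map (fun j => (i, j))).filter (fun p => bCell arr p.1 p.2 == "*")).take 2
      ∧ min 2 (aRow arr i js ans).length
        = min 2 (ans ++ (js.map (fun j => (i, j))).filter
            (fun p => bCell arr p.1 p.2 == "*")).length := by
  induction js generalizing ans with
  | nil => simp [aRow]
  | cons j rest ih =>
      rw [aRow, List.map_cons, List.filter_cons]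
      have hcell : aCell arr i j = bCell arr i j := rfl
      rw [hcell]
      by_cases hs : (bCell arr i j == "*") = true
      · rw [if_pos hs, if_pos hs]
        by_cases hl : ((ans ++ [(i, j)]).length == 2) = true
        · rw [if_pos hl]
          have hl2 : (ans ++ [(i, j)]).length = 2 := by simpa using hl
          have e : ans ++ (i, j) :: (rest.map (fun j => (i, j))).filter
              (fun p => bCell arr p.1 p.2 == "*")
              = (ans ++ [(i, j)]) ++ (rest.map (fun j => (i, j))).filter
                  (fun p => bCell arr p.1 p.2 == "*") := by simp
          rw [e]
          have hb := take2_break (ans ++ [(i, j)]) ((rest.map (fun j => (i, j))).filter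
            (fun p => bCell arr p.1 p.2 == "*")) hl2
          exact ⟨hb.1.symm, hb.2.symm⟩
        · rw [if_neg hl]
          have := ih (ans ++ [(i, j)])
          simpa [List.append_assoc] using this
      · rw [if_neg hs, if_neg hs]
        by_cases hl : (ans.length == 2) = true
        · rw [if_pos hl]
          have hl2 : ans.length = 2 := by simpa using hl
          have hb := take2_break ans ((rest.map (fun j => (i, j))).filter
            (fun p => bCell arr p.1 p.2 == "*")) hl2
          exact ⟨hb.1.symm, hb.2.symm⟩
        · rw [if_neg hl]
          exact ih ans

-- the fold over rows, generalized in the accumulator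
theorem aScan_fold (arr : List (List String)) (n : Int) (is : List Int)
    (ans : List (Int × Int)) :
    (is.foldl (fun ans i => aRow arr i (PySem.List.pyRange 0 n 1) ans) ans).take 2
      = (ans ++ is.flatMap (fun i => ((PySem.List.pyRange 0 n 1).map (fun j => (i, j))).filter
          (fun p => bCell arr p.1 p.2 == "*"))).take 2
    ∧ min 2 (is.foldl (fun ans i => aRow arr i (PySem.List.pyRange 0 n 1) ans) ans).length
      = min 2 (ans ++ is.flatMap (fun i => ((PySem.List.pyRange 0 n 1).map (fun j => (i, j))).filter
          (fun p => bCell arr p.1 p.2 == "*"))).length := by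
  induction is generalizing ans with
  | nil => simp
  | cons i rest ih =>
      rw [List.foldl_cons, List.flatMap_cons, ← List.append_assoc]
      have hrow := aRow_spec arr i (PySem.List.pyRange 0 n 1) ans
      have hc := take2_append_congr (aRow arr i (PySem.List.pyRange 0 n 1) ans)
        (ans ++ ((PySem.List.pyRange 0 n 1).map (fun j => (i, j))).filter
          (fun p => bCell arr p.1 p.2 == "*"))
        (rest.flatMap (fun i => ((PySem.List.pyRange 0 n 1).map (fun j => (i, j))).filter
          (fun p => bCell arr p.1 p.2 == "*"))) hrow.1 hrow.2
      have hi := ih (aRow arr i (PySem.List.pyRange 0 n 1) ans)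
      exact ⟨hi.1.trans hc.1, hi.2.trans hc.2⟩

-- the whole scan agrees with bStars on the first two elements
theorem aScan_spec (arr : List (List String)) (n : Int) :
    ((PySem.List.pyRange 0 n 1).foldl
        (fun ans i => aRow arr i (PySem.List.pyRange 0 n 1) ans) []).take 2
      = (bStars n arr).take 2
    ∧ min 2 ((PySem.List.pyRange 0 n 1).foldl
        (fun ans i => aRow arr i (PySem.List.pyRange 0 n 1) ans) []).length
      = min 2 (bStars n arr).length := by
  have h := aScan_fold arr n (PySem.List.pyRange 0 n 1) []
  rw [List.nil_append] at h
  rw [bStars, List.filter_flatMap]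
  exact h

-- counting stars in an initial segment, via getD
theorem countP_range_getD (row : List String) : ∀ (m : Nat), m ≤ row.length →
    (List.range m).countP (fun k => row.getD k "" == "*") = (row.take m).count "*" := by
  intro m
  induction m with
  | zero => simp
  | succ m ih =>
      intro h
      have hm : m < row.length := by omega
      rw [List.range_succ, List.countP_append, ih (by omega), List.take_add_one,
        List.getElem?_eq_getElem hm, List.count_append]
      have h1 : (List.countP (fun k => row.getD k "" == "*") [m])
          = List.count "*" (some row[m]).toList := by
        simp [List.getD_eq_getElem?_getD, List.getElem?_eq_getElem hm, List.count_singleton]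
      omega

-- reading an initial segment through getD is take
theorem map_range_getD {α : Type} (l : List α) (d : α) : ∀ (m : Nat), m ≤ l.length →
    (List.range m).map (fun i => l.getD i d) = l.take m := by
  intro m
  induction m with
  | zero => simp
  | succ m ih =>
      intro h
      have hm : m < l.length := by omega
      rw [List.range_succ, List.map_append, ih (by omega), List.take_add_one,
        List.getElem?_eq_getElem hm]
      simp [List.getD_eq_getElem?_getD, List.getElem?_eq_getElem hm]

-- the first n rows of a Pre_-admitted grid all have length ≥ n
theorem pre_rowlen (n : Int) (arr : List (List String)) (h : Pre_almostRect n arr) :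
    ∀ ki : Nat, ki < n.toNat → n.toNat ≤ (arr.getD ki []).length := by
  obtain ⟨hn2, hlen, hrows, hcnt⟩ := h
  intro ki hki
  apply hrows
  have hki' : ki < arr.length := lt_of_lt_of_le hki hlen
  have h1 : ki < (arr.take n.toNat).length := by simp [List.length_take]; omega
  have h2 : (arr.take n.toNat)[ki] = arr[ki] := List.getElem_take
  have h3 : arr.getD ki [] = (arr.take n.toNat)[ki] := by
    rw [h2, List.getD_eq_getElem?_getD, List.getElem?_eq_getElem hki']; rfl
  rw [h3]
  exact List.getElem_mem h1

theorem bStars_length (n : Int) (arr : List (List String)) (h : Pre_almostRect n arr) :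
    2 ≤ (bStars n arr).length := by
  have hrowlen := pre_rowlen n arr h
  obtain ⟨hn2, hlen, hrows, hcnt⟩ := h
  have hrange : PySem.List.pyRange 0 n 1 = (List.range n.toNat).map Int.ofNat := by
    rw [PySem.List.pyRange_one]
    simp only [Int.sub_zero]
    exact List.map_congr_left (fun k _ => zero_add (Int.ofNat k))
  have inner : ∀ ki : Nat, ki < n.toNat →
      ((((List.range n.toNat).map Int.ofNat).map
          (fun j => (Int.ofNat ki, j))).filter (fun p => bCell arr p.1 p.2 == "*")).length
        = ((arr.getD ki []).take n.toNat).count "*" := by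
    intro ki hki
    rw [← List.countP_eq_length_filter, List.countP_map, List.countP_map]
    rw [← countP_range_getD (arr.getD ki []) n.toNat (hrowlen ki hki)]
    apply List.countP_congr
    intro k _
    simp [Function.comp, bCell, List.getD_eq_getElem?_getD]
  have key : (bStars n arr).length
      = ((arr.take n.toNat).map (fun row => (row.take n.toNat).count "*")).sum := by
    rw [bStars, List.filter_flatMap, List.length_flatMap, hrange, List.map_map]
    calc ((List.range n.toNat).map ((fun a => ((((List.range n.toNat).map Int.ofNat).map
            (fun j => (a, j))).filter (fun p => bCell arr p.1 p.2 == "*")).length)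
            ∘ Int.ofNat)).sum
        = ((List.range n.toNat).map
            (fun ki => ((arr.getD ki []).take n.toNat).count "*")).sum := by
          apply congrArg
          apply List.map_congr_left
          intro ki hki
          rw [List.mem_range] at hki
          exact inner ki hki
      _ = (((List.range n.toNat).map (fun ki => arr.getD ki [])).map
            (fun row => (row.take n.toNat).count "*")).sum := by rw [List.map_map]; rfl
      _ = ((arr.take n.toNat).map (fun row => (row.take n.toNat).count "*")).sum := by
          rw [map_range_getD arr [] n.toNat hlen]
  rw [key]; exact hcnt

theorem bStars_nodup (n : Int) (arr : List (List String)) : (bStars n arr).Nodup := by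
  rw [bStars]
  apply List.Nodup.filter
  exact List.Nodup.product (PySem.List.nodup_pyRange_one 0 n) (PySem.List.nodup_pyRange_one 0 n)

-- Nat-indexed views of the grid used by the stamp lemmas below
def cellN (g : List (List String)) (i j : Nat) : String := (g.getD i []).getD j ""
def setN (g : List (List String)) (x y : Nat) : List (List String) :=
  g.set x ((g.getD x []).set y "*")

theorem aSet_eq_setN (g : List (List String)) (x y : Int) (hx : 0 ≤ x) (hy : 0 ≤ y) :
    aSet g x y = setN g x.toNat y.toNat := by
  rw [aSet, setN, PySem.List.pyGet?_of_nonneg _ hx,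
    PySem.List.pySetD_of_nonneg _ _ hy, PySem.List.pySetD_of_nonneg _ _ hx,
    List.getD_eq_getElem?_getD]

theorem bCell_eq_cellN (g : List (List String)) (i j : Int) (hi : 0 ≤ i) (hj : 0 ≤ j) :
    bCell g i j = cellN g i.toNat j.toNat := by
  rw [bCell, cellN, PySem.List.pyGetD_of_nonneg _ _ hi, PySem.List.pyGetD_of_nonneg _ _ hj]

theorem length_setN (g : List (List String)) (x y : Nat) : (setN g x y).length = g.length := by
  simp [setN]

theorem rowlen_setN (g : List (List String)) (x y i : Nat) :
    ((setN g x y).getD i []).length = (g.getD i []).length := by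
  rw [setN, List.getD_eq_getElem?_getD, List.getD_eq_getElem?_getD, List.getElem?_set]
  by_cases hix : x = i
  · subst hix
    by_cases hi : x < g.length
    · simp [hi, List.getD_eq_getElem?_getD]
    · simp [hi, List.getD_eq_getElem?_getD]
  · simp [hix]

theorem cell_setN (g : List (List String)) (x y i j : Nat)
    (hx : x < g.length) (hy : y < (g.getD x []).length) :
    cellN (setN g x y) i j = if i = x ∧ j = y then "*" else cellN g i j := by
  rw [cellN, setN, List.getD_eq_getElem?_getD (l := g.set x _), List.getElem?_set]
  by_cases hix : x = i
  · subst hix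
    rw [if_pos rfl, if_pos hx]
    simp only [Option.getD_some]
    rw [List.getD_eq_getElem?_getD (l := (g.getD x []).set y _), List.getElem?_set]
    by_cases hjy : y = j
    · subst hjy
      rw [if_pos rfl, if_pos hy]
      simp
    · rw [if_neg hjy, if_neg (by omega)]
      rw [cellN, List.getD_eq_getElem?_getD (l := g.getD x [])]
  · rw [if_neg hix, if_neg (by omega)]
    rw [cellN, List.getD_eq_getElem?_getD (l := g)]

-- the double point-write equals B's rows×cols functional render of the grid
theorem stamp_eq (arr : List (List String)) (rows cols : List Int) (x1 y1 x2 y2 : Int)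
    (hx1 : 0 ≤ x1) (hy1 : 0 ≤ y1) (hx2 : 0 ≤ x2) (hy2 : 0 ≤ y2)
    (hx1l : x1.toNat < arr.length) (hy1l : y1.toNat < (arr.getD x1.toNat []).length)
    (hx2l : x2.toNat < arr.length) (hy2l : y2.toNat < (arr.getD x2.toNat []).length)
    (hP1 : x1 ∈ rows ∧ y1 ∈ cols) (hP2 : x2 ∈ rows ∧ y2 ∈ cols)
    (hs : ∀ (i j : Nat), i < arr.length → j < (arr.getD i []).length →
        (i : Int) ∈ rows → (j : Int) ∈ cols →
        (i = x1.toNat ∧ j = y1.toNat) ∨ (i = x2.toNat ∧ j = y2.toNat) ∨ cellN arr i j = "*") :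
    aSet (aSet arr x1 y1) x2 y2
      = (PySem.List.enumerate arr 0).map (fun p => (PySem.List.enumerate p.2 0).map
          (fun q => if PySem.Set.contains rows p.1 && PySem.Set.contains cols q.1
                    then "*" else q.2)) := by
  rw [aSet_eq_setN _ _ _ hx1 hy1, aSet_eq_setN _ _ _ hx2 hy2]
  have hlen1 : (setN arr x1.toNat y1.toNat).length = arr.length := length_setN _ _ _
  apply List.ext_getElem
  · simp [length_setN, PySem.List.length_enumerate]
  · intro i hiL hiR
    have hi : i < arr.length := by
      rw [length_setN, length_setN] at hiL; exact hiL
    have hR : ((PySem.List.enumerate arr 0).map (fun p => (PySem.List.enumerate p.2 0).map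
        (fun q => if PySem.Set.contains rows p.1 && PySem.Set.contains cols q.1
                  then "*" else q.2)))[i]
        = (PySem.List.enumerate arr[i] 0).map
            (fun q => if PySem.Set.contains rows ((0 : Int) + i) && PySem.Set.contains cols q.1
                      then "*" else q.2) := by
      rw [List.getElem_map]
      rw [PySem.List.getElem_enumerate]
    rw [hR]
    have hgetD : arr.getD i [] = arr[i] := by
      rw [List.getD_eq_getElem?_getD, List.getElem?_eq_getElem hi]; rfl
    have hrowl : ((setN (setN arr x1.toNat y1.toNat) x2.toNat y2.toNat).getD i []).length
        = arr[i].length := by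
      rw [rowlen_setN, rowlen_setN, hgetD]
    have hLrow : (setN (setN arr x1.toNat y1.toNat) x2.toNat y2.toNat)[i]
        = (setN (setN arr x1.toNat y1.toNat) x2.toNat y2.toNat).getD i [] := by
      rw [List.getD_eq_getElem?_getD, List.getElem?_eq_getElem hiL]; rfl
    rw [hLrow]
    apply List.ext_getElem
    · rw [hrowl]; simp [PySem.List.length_enumerate]
    · intro j hjL hjR
      have hj : j < arr[i].length := by rw [hrowl] at hjL; exact hjL
      have hj' : j < (arr.getD i []).length := by rw [hgetD]; exact hj
      have hRj : ((PySem.List.enumerate arr[i] 0).map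
          (fun q => if PySem.Set.contains rows ((0 : Int) + i) && PySem.Set.contains cols q.1
                    then "*" else q.2))[j]
          = if PySem.Set.contains rows ((0 : Int) + i) && PySem.Set.contains cols ((0 : Int) + j)
            then "*" else arr[i][j] := by
        rw [List.getElem_map, PySem.List.getElem_enumerate]
      rw [hRj]
      have hLj : ((setN (setN arr x1.toNat y1.toNat) x2.toNat y2.toNat).getD i [])[j]
          = cellN (setN (setN arr x1.toNat y1.toNat) x2.toNat y2.toNat) i j := by
        rw [cellN, List.getD_eq_getElem?_getD
          (l := (setN (setN arr x1.toNat y1.toNat) x2.toNat y2.toNat).getD i []),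
          List.getElem?_eq_getElem hjL]; rfl
      rw [hLj]
      rw [cell_setN _ _ _ _ _ (by rw [hlen1]; exact hx2l)
        (by rw [rowlen_setN]; exact hy2l)]
      rw [cell_setN _ _ _ _ _ hx1l hy1l]
      have hcellg : cellN arr i j = arr[i][j] := by
        rw [cellN, hgetD, List.getD_eq_getElem?_getD, List.getElem?_eq_getElem hj]; rfl
      have hmemr : (PySem.Set.contains rows ((0 : Int) + i) = true) ↔ ((i : Int) ∈ rows) := by
        rw [zero_add]; exact PySem.Set.contains_iff rows _
      have hmemc : ∀ j : Nat, (PySem.Set.contains cols ((0 : Int) + j) = true) ↔ ((j : Int) ∈ cols) := by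
        intro j; rw [zero_add]; exact PySem.Set.contains_iff cols _
      by_cases hb : (PySem.Set.contains rows ((0 : Int) + i)
          && PySem.Set.contains cols ((0 : Int) + j)) = true
      · rw [if_pos hb]
        rw [Bool.and_eq_true] at hb
        have hir : (i : Int) ∈ rows := hmemr.mp hb.1
        have hjc : (j : Int) ∈ cols := (hmemc j).mp hb.2
        rcases hs i j hi hj' hir hjc with ⟨e1, e2⟩ | ⟨e1, e2⟩ | hstar
        · by_cases h2 : i = x2.toNat ∧ j = y2.toNat
          · rw [if_pos h2]
          · rw [if_neg h2, if_pos ⟨e1, e2⟩]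
        · rw [if_pos ⟨e1, e2⟩]
        · split_ifs with h2 h1
          · rfl
          · rfl
          · exact hstar
      · rw [if_neg hb]
        have h2 : ¬ (i = x2.toNat ∧ j = y2.toNat) := by
          rintro ⟨e1, e2⟩
          apply hb
          rw [Bool.and_eq_true, hmemr, hmemc]
          constructor
          · have : (i : Int) = x2 := by omega
            rw [this]; exact hP2.1
          · have : (j : Int) = y2 := by omega
            rw [this]; exact hP2.2
        have h1 : ¬ (i = x1.toNat ∧ j = y1.toNat) := by
          rintro ⟨e1, e2⟩
          apply hb
          rw [Bool.and_eq_true, hmemr, hmemc]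
          constructor
          · have : (i : Int) = x1 := by omega
            rw [this]; exact hP1.1
          · have : (j : Int) = y1 := by omega
            rw [this]; exact hP1.2
        rw [if_neg h2, if_neg h1, hcellg]

-- aRender of the stamped grid is B's rendered expression
theorem render_map (arr : List (List String)) (rows cols : List Int) :
    aRender ((PySem.List.enumerate arr 0).map (fun p => (PySem.List.enumerate p.2 0).map
        (fun q => if PySem.Set.contains rows p.1 && PySem.Set.contains cols q.1
                  then "*" else q.2)))
      = PySem.Str.join "\n" ((PySem.List.enumerate arr 0).map (fun p =>
          PySem.Str.join "" ((PySem.List.enumerate p.2 0).map (fun q =>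
            if PySem.Set.contains rows p.1 && PySem.Set.contains cols q.1
            then "*" else q.2)))) := by
  rw [aRender, List.map_map]
  rfl

-- ===== VERDICT (by name: the statement is the Claim_ definition above) =====
theorem almostRect_spec : Claim_equal_almostRect := by
  intro n arr _hdom hpre
  unfold Spec_almostRect
  have hrowlen := pre_rowlen n arr hpre
  have hblen : 2 ≤ (bStars n arr).length := bStars_length n arr hpre
  obtain ⟨hn2, hlen, hrows, hcnt⟩ := hpre
  obtain ⟨q0, q1, t, hq⟩ : ∃ q0 q1 t, bStars n arr = q0 :: q1 :: t := by
    match hB : bStars n arr with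
    | [] => rw [hB] at hblen; simp at hblen
    | [q] => rw [hB] at hblen; simp at hblen
    | q0 :: q1 :: t => exact ⟨q0, q1, t, rfl⟩
  have hscan := aScan_spec arr n
  rw [hq] at hscan
  obtain ⟨t', hans⟩ : ∃ t', ((PySem.List.pyRange 0 n 1).foldl
      (fun ans i => aRow arr i (PySem.List.pyRange 0 n 1) ans) []) = q0 :: q1 :: t' := by
    match hA : ((PySem.List.pyRange 0 n 1).foldl
        (fun ans i => aRow arr i (PySem.List.pyRange 0 n 1) ans) []) with
    | [] => rw [hA] at hscan; simp at hscan
    | [q] => rw [hA] at hscan; simp at hscan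
    | a0 :: a1 :: t' =>
        rw [hA] at hscan
        have h01 : a0 = q0 ∧ a1 = q1 := by
          have h2 := hscan.1
          simp [List.take] at h2
          exact ⟨h2.1, h2.2⟩
        exact ⟨t', by rw [h01.1, h01.2]⟩
  have hq0mem : q0 ∈ bStars n arr := by rw [hq]; exact List.mem_cons_self
  have hq1mem : q1 ∈ bStars n arr := by rw [hq]; simp
  have hstar : ∀ q ∈ bStars n arr,
      cellN arr q.1.toNat q.2.toNat = "*" ∧ 0 ≤ q.1 ∧ q.1 < n ∧ 0 ≤ q.2 ∧ q.2 < n := by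
    intro q hqm
    rw [bStars, List.mem_filter] at hqm
    obtain ⟨hmem, hP⟩ := hqm
    rw [List.mem_flatMap] at hmem
    obtain ⟨i, hi, hmap⟩ := hmem
    rw [List.mem_map] at hmap
    obtain ⟨j, hj, hqe⟩ := hmap
    rw [PySem.List.mem_pyRange_one] at hi hj
    have hb : (0 : Int) ≤ q.1 ∧ q.1 < n ∧ 0 ≤ q.2 ∧ q.2 < n := by
      rw [← hqe]; exact ⟨hi.1, hi.2, hj.1, hj.2⟩
    refine ⟨?_, hb⟩
    rw [← bCell_eq_cellN arr q.1 q.2 hb.1 hb.2.2.1]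
    exact beq_iff_eq.mp hP
  obtain ⟨hstar0, hr1_0, hr1_n, hc1_0, hc1_n⟩ := hstar q0 hq0mem
  obtain ⟨hstar1, hr2_0, hr2_n, hc2_0, hc2_n⟩ := hstar q1 hq1mem
  have hqne : q0 ≠ q1 := by
    have hnd := bStars_nodup n arr
    rw [hq, List.nodup_cons] at hnd
    intro he
    exact hnd.1 (he ▸ List.mem_cons_self)
  obtain ⟨r1, c1⟩ := q0
  obtain ⟨r2, c2⟩ := q1
  simp only at hstar0 hstar1 hr1_0 hr1_n hc1_0 hc1_n hr2_0 hr2_n hc2_0 hc2_n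
  have hx : ∀ x : Int, 0 ≤ x → x < n → x.toNat < arr.length := by
    intro x h0 h1; omega
  have hy : ∀ x y : Int, 0 ≤ x → x < n → 0 ≤ y → y < n →
      y.toNat < (arr.getD x.toNat []).length := by
    intro x y h0 h1 h2 h3
    have := hrowlen x.toNat (by omega)
    omega
  simp only [almostRect, almostRect_alt]
  rw [hans, hq]
  have htake : ((r1, c1) :: (r2, c2) :: t).take 2 = [(r1, c1), (r2, c2)] := rfl
  rw [htake]
  simp only [List.getElem?_cons_zero, List.getElem?_cons_succ]
  by_cases hrr : r1 = r2
  · subst hrr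
    have hcc : c1 ≠ c2 := fun h => hqne (by rw [h])
    simp only [beq_self_eq_true, if_true, bne_self_eq_false, Bool.false_eq_true, if_false,
      bne_iff_ne, ne_eq, hcc, not_false_eq_true, if_true]
    have hR0 : (0 : Int) ≤ (if (r1 == 0) = true then r1 + 1 else r1 - 1) := by
      split_ifs with h <;> simp_all <;> omega
    have hRn : (if (r1 == 0) = true then r1 + 1 else r1 - 1) < n := by
      split_ifs with h <;> simp_all <;> omega
    have hRB : (if (r1 == 0) = true then r1 + 1 else r1 - 1)
        = (if (r1 == 0) = true then 1 else r1 - 1) := by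
      split_ifs with h
      · simp_all
      · rfl
    rw [stamp_eq arr (PySem.Set.ofList [r1, if (r1 == 0) = true then 1 else r1 - 1])
        (PySem.Set.ofList [c1, c2])
        (if (r1 == 0) = true then r1 + 1 else r1 - 1) c1
        (if (r1 == 0) = true then r1 + 1 else r1 - 1) c2
        hR0 hc1_0 hR0 hc2_0
        (hx _ hR0 hRn) (hy _ _ hR0 hRn hc1_0 hc1_n)
        (hx _ hR0 hRn) (hy _ _ hR0 hRn hc2_0 hc2_n)
        ?_ ?_ ?_]
    · exact render_map arr _ _
    · rw [hRB]; simp [PySem.Set.mem_ofList]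
    · rw [hRB]; simp [PySem.Set.mem_ofList]
    · intro i j hi hj hir hjc
      simp only [PySem.Set.mem_ofList, List.mem_cons, List.not_mem_nil, or_false] at hir hjc
      rcases hir with hir | hir
      · right; right
        have hi1 : i = r1.toNat := by omega
        rcases hjc with hjc | hjc
        · have hj1 : j = c1.toNat := by omega
          rw [hi1, hj1]; exact hstar0
        · have hj2 : j = c2.toNat := by omega
          rw [hi1, hj2]; exact hstar1
      · rw [← hRB] at hir
        rcases hjc with hjc | hjc
        · left; constructor <;> omega
        · right; left; constructor <;> omega
  · by_cases hcc : c1 = c2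
    · subst hcc
      simp only [beq_iff_eq, hrr, if_false, bne_iff_ne, ne_eq, not_false_eq_true,
        ite_true, beq_self_eq_true, bne_self_eq_false, Bool.false_eq_true]
      have hC0 : (0 : Int) ≤ (if c1 = 0 then c1 + 1 else c1 - 1) := by
        split_ifs with h <;> omega
      have hCn : (if c1 = 0 then c1 + 1 else c1 - 1) < n := by
        split_ifs with h <;> omega
      have hCB : (if c1 = 0 then c1 + 1 else c1 - 1)
          = (if c1 = 0 then 1 else c1 - 1) := by
        split_ifs with h
        · omega
        · rfl
      rw [stamp_eq arr (PySem.Set.ofList [r1, r2])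
          (PySem.Set.ofList [c1, if c1 = 0 then 1 else c1 - 1])
          r1 (if c1 = 0 then c1 + 1 else c1 - 1)
          r2 (if c1 = 0 then c1 + 1 else c1 - 1)
          hr1_0 hC0 hr2_0 hC0
          (hx _ hr1_0 hr1_n) (hy _ _ hr1_0 hr1_n hC0 hCn)
          (hx _ hr2_0 hr2_n) (hy _ _ hr2_0 hr2_n hC0 hCn)
          ?_ ?_ ?_]
      · exact render_map arr _ _
      · rw [hCB]; simp [PySem.Set.mem_ofList]
      · rw [hCB]; simp [PySem.Set.mem_ofList]
      · intro i j hi hj hir hjc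
        simp only [PySem.Set.mem_ofList, List.mem_cons, List.not_mem_nil, or_false] at hir hjc
        rcases hjc with hjc | hjc
        · right; right
          have hj1 : j = c1.toNat := by omega
          rcases hir with hir | hir
          · have hi1 : i = r1.toNat := by omega
            rw [hi1, hj1]; exact hstar0
          · have hi2 : i = r2.toNat := by omega
            rw [hi2, hj1]; exact hstar1
        · rw [← hCB] at hjc
          rcases hir with hir | hir
          · left; constructor <;> omega
          · right; left; constructor <;> omega
    · simp only [beq_iff_eq, hrr, hcc, if_false, bne_iff_ne, ne_eq,
        not_false_eq_true, ite_true]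
      rw [stamp_eq arr (PySem.Set.ofList [r1, r2]) (PySem.Set.ofList [c1, c2])
          r1 c2 r2 c1 hr1_0 hc2_0 hr2_0 hc1_0
          (hx _ hr1_0 hr1_n) (hy _ _ hr1_0 hr1_n hc2_0 hc2_n)
          (hx _ hr2_0 hr2_n) (hy _ _ hr2_0 hr2_n hc1_0 hc1_n)
          (by simp [PySem.Set.mem_ofList]) (by simp [PySem.Set.mem_ofList]) ?_]
      · exact render_map arr _ _
      · intro i j hi hj hir hjc
        simp only [PySem.Set.mem_ofList, List.mem_cons, List.not_mem_nil, or_false] at hir hjc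
        rcases hir with hir | hir
        · rcases hjc with hjc | hjc
          · right; right
            have hi1 : i = r1.toNat := by omega
            have hj1 : j = c1.toNat := by omega
            rw [hi1, hj1]; exact hstar0
          · left; constructor <;> omega
        · rcases hjc with hjc | hjc
          · right; left; constructor <;> omega
          · right; right
            have hi2 : i = r2.toNat := by omega
            have hj2 : j = c2.toNat := by omega
            rw [hi2, hj2]; exact hstar1
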